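-- pv_equiv track=rewrite | github.com/pranavmahabs/genomeassembler | contamination.py | get_seeds
-- ===== SOURCE A (Python) =====
-- def get_seeds(vector: str, k: int) -> list:
--     kmers = {}
--     for i in range(0, len(vector) - k + 1):
--         kmer = vector[i : i + k]
--         if kmer in kmers:
--             kmers[kmer].append(i)
--         else:
--             kmers[kmer] = [i]
--     return kmers
-- ===== SOURCE B (Python) =====
-- def get_seeds(vector: str, k: int) -> list:
--     kmers = [vector[i : i + k] for i in range(len(vector) - k + 1)]
--     return {s: [i for i, t in enumerate(kmers) if t == s] for s in dict.fromkeys(kmers)}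
-- ===== Notes on version B (the rewrite author's own statement) =====
-- stated objective: alternative
-- what changed: Materialises the k-mer list once, dedups it with dict.fromkeys to get the distinct k-mers in first-occurrence order, then builds each index list with a per-key enumerate scan in a dict comprehension; A does a single pass with an if/else membership branch on a growing dict.
import Mathlib
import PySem

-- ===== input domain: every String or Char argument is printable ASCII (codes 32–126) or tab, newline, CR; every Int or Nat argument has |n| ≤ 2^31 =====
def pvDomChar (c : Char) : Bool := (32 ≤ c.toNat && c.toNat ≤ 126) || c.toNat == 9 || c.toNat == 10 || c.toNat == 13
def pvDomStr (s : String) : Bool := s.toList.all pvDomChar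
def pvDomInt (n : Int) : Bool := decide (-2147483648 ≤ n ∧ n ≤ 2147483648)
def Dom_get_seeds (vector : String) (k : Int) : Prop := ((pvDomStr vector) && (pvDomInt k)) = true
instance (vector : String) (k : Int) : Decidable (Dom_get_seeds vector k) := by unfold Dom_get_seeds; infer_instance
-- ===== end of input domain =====

-- B materialises the k-mer list once, dedups it (dict.fromkeys) for the distinct k-mers in
-- first-occurrence order, and builds each index list by a per-key enumerate scan; same return
-- value, a genuinely different decomposition (objective: alternative).

-- ===== PORT A =====
def get_seeds (vector : String) (k : Int) : List (String × List Int) :=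
  ((PySem.List.pyRange 0 ((PySem.Str.len vector : Int) - k + 1) 1).foldl
    (fun kmers i =>
      let kmer := PySem.Str.slice vector (some i) (some (i + k))
      if kmers.contains kmer then kmers.modify kmer [] (· ++ [i])
      else kmers.insert kmer [i])
    PySem.Dict.empty).items

-- ===== PORT B =====
-- dict.fromkeys(kmers) (first occurrences, in order) is PySem.List.dedup; enumerate(kmers) is
-- PySem.List.enumerate kmers 0.
def get_seeds_alt (vector : String) (k : Int) : List (String × List Int) :=
  let kmers := (PySem.List.pyRange 0 ((PySem.Str.len vector : Int) - k + 1) 1).map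
    (fun i => PySem.Str.slice vector (some i) (some (i + k)))
  (PySem.List.dedup kmers).map
    (fun s => (s, ((PySem.List.enumerate kmers 0).filter (fun p => p.2 == s)).map (·.1)))

-- ===== PRECONDITION & SPEC =====
def Spec_get_seeds (vector : String) (k : Int) (out : List (String × List Int)) : Prop := out = get_seeds_alt vector k
instance (vector : String) (k : Int) (out : List (String × List Int)) : Decidable (Spec_get_seeds vector k out) := by unfold Spec_get_seeds; infer_instance

-- ===== CLAIM (what is proved, stated in full; the proofs are below) =====
def Claim_equal_get_seeds : Prop := ∀ (vector : String) (k : Int), Dom_get_seeds vector k → Spec_get_seeds vector k (get_seeds vector k)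

-- ===== LEMMAS AND PROOFS =====

-- Canonical form both ports are reduced to: distinct k-mers in first-occurrence order, each paired
-- with all its positions in ascending order.
def pvCanon (r : List Int) (sl : Int → String) : List (String × List Int) :=
  (PySem.List.dedup (r.map sl)).map (fun c => (c, r.filter (fun i => sl i == c)))

-- A's branch (append if present, fresh singleton otherwise) is exactly d.modify with default [].
lemma branch_eq_modify (d : PySem.Dict String (List Int)) (s : String) (i : Int) :
    (if d.contains s then d.modify s [] (· ++ [i]) else d.insert s [i]) =
      d.modify s [] (· ++ [i]) := by
  by_cases h : d.contains s = true
  · simp [h]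
  · have h' : d.contains s = false := by simp [h]
    simp [h', PySem.Dict.modify, PySem.Dict.getD_of_not_contains]

-- ===== A = canonical =====
lemma a_eq_canon (vector : String) (k : Int) :
    get_seeds vector k = pvCanon (PySem.List.pyRange 0 ((PySem.Str.len vector : Int) - k + 1) 1)
      (fun i => PySem.Str.slice vector (some i) (some (i + k))) := by
  unfold get_seeds pvCanon
  set sl : Int → String := fun i => PySem.Str.slice vector (some i) (some (i + k)) with hsl
  set r : List Int := PySem.List.pyRange 0 ((PySem.Str.len vector : Int) - k + 1) 1 with hr
  have hbody : (r.foldl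
      (fun kmers i =>
        let kmer := PySem.Str.slice vector (some i) (some (i + k))
        if kmers.contains kmer then kmers.modify kmer [] (· ++ [i])
        else kmers.insert kmer [i]) PySem.Dict.empty)
      = r.foldl (fun d i => d.modify (sl i) [] (· ++ [i])) PySem.Dict.empty := by
    have hfun : (fun (kmers : PySem.Dict String (List Int)) (i : Int) =>
        if kmers.contains (sl i) then kmers.modify (sl i) [] (· ++ [i])
        else kmers.insert (sl i) [i])
        = fun (d : PySem.Dict String (List Int)) (i : Int) => d.modify (sl i) [] (· ++ [i]) := by
      funext d i
      exact branch_eq_modify d (sl i) i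
    rw [hfun]
  rw [hbody]
  have hnodup : (r.foldl (fun d i => d.modify (sl i) [] (· ++ [i])) PySem.Dict.empty).keys.Nodup :=
    PySem.Dict.nodup_keys_foldl_modify_key r sl [] (fun _ i => (· ++ [i])) _ (by simp)
  rw [PySem.Dict.items_eq_map_keys _ hnodup []]
  have hkeys : (r.foldl (fun d i => d.modify (sl i) [] (· ++ [i])) PySem.Dict.empty).keys
      = PySem.List.dedup (r.map sl) := by
    rw [PySem.Dict.keys_foldl_modify_key r sl [] (fun _ i => (· ++ [i])) _]
    simp [PySem.Set.update_nil_left]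
  rw [hkeys]
  apply List.map_congr_left
  intro c _
  have hgetD : (r.foldl (fun d i => d.modify (sl i) [] (· ++ [i])) PySem.Dict.empty).getD c []
      = ((r.map (fun i => (sl i, i))).filter (fun p => p.1 == c)).map (·.2) := by
    have := PySem.Dict.getD_foldl_modify_append (r.map (fun i => (sl i, i)))
      (PySem.Dict.empty : PySem.Dict String (List Int)) c
    rw [List.foldl_map] at this
    simpa using this
  rw [hgetD]
  simp [List.filter_map, Function.comp_def]

-- ===== B = canonical =====

-- the per-key enumerate scan over the materialised k-mer list gives exactly the range positions
-- whose slice equals the key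
lemma enum_filter_map (g : Int → String) (m : Int) (c : String) :
    ((PySem.List.enumerate ((PySem.List.pyRange 0 m 1).map g) 0).filter (fun p => p.2 == c)).map (·.1)
      = (PySem.List.pyRange 0 m 1).filter (fun i => g i == c) := by
  have hrange : PySem.List.pyRange 0 ((((PySem.List.pyRange 0 m 1).map g).length : Int)) 1
      = PySem.List.pyRange 0 m 1 := by
    by_cases hm : 0 ≤ m
    · have : (((PySem.List.pyRange 0 m 1).map g).length : Int) = m := by
        simp [PySem.List.length_pyRange_one]
        omega
      rw [this]
    · have h0 : PySem.List.pyRange 0 m 1 = [] := PySem.List.pyRange_one_eq_nil (by omega)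
      simp [h0]
  rw [PySem.List.enumerate_eq_map_pyRange _ ""]
  simp only [PySem.List.len_eq] at hrange ⊢
  rw [hrange]
  rw [List.filter_map, List.map_map]
  have hfilter : List.filter ((fun p => p.2 == c) ∘ fun j =>
        (j, PySem.List.pyGetD ((PySem.List.pyRange 0 m 1).map g) j ""))
        (PySem.List.pyRange 0 m 1)
      = List.filter (fun i => g i == c) (PySem.List.pyRange 0 m 1) := by
    apply List.filter_congr
    intro j hj
    have hmem := (PySem.List.mem_pyRange_one).mp hj
    simp only [Function.comp_def]
    rw [PySem.List.pyGetD_map_pyRange_of_nonneg g m j "" hmem.1 hmem.2]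
  rw [hfilter]
  simp [Function.comp_def]

lemma b_eq_canon (vector : String) (k : Int) :
    get_seeds_alt vector k = pvCanon (PySem.List.pyRange 0 ((PySem.Str.len vector : Int) - k + 1) 1)
      (fun i => PySem.Str.slice vector (some i) (some (i + k))) := by
  unfold get_seeds_alt pvCanon
  apply List.map_congr_left
  intro c _
  rw [enum_filter_map]

theorem get_seeds_spec' (vector : String) (k : Int) :
    get_seeds vector k = get_seeds_alt vector k := by
  rw [a_eq_canon, b_eq_canon]

-- ===== VERDICT (by name: the statement is the Claim_ definition above) =====
theorem get_seeds_spec : Claim_equal_get_seeds := by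
  intro vector k _
  exact get_seeds_spec' vector k
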